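-- pv_equiv track=rewrite | github.com/ololoshka2871/OPAL-rust | test/pb_reader.py | gen_pattern
-- ===== SOURCE A (Python) =====
-- def gen_pattern(chanel_mask):
--     res = '{0};{1};'
--     c = 2
--     for i in range(32):
--         if chanel_mask & (1 << i):
--             res += ('{fn[0]};{fn[1]};'.replace('fn', str(c)))
--             c += 1
--
--     return res
-- ===== SOURCE B (Python) =====
-- def gen_pattern(chanel_mask):
--     # count set bits in the low 32 bits once, then generate the pattern
--     n = (chanel_mask & 0xFFFFFFFF).bit_count()
--     return '{0};{1};' + ''.join('{%d[0]};{%d[1]};' % (c, c) for c in range(2, 2 + n))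
-- ===== Notes on version B (the rewrite author's own statement) =====
-- stated objective: simpler
-- what changed: A scans every bit of the mask and grows the result string inside the scan with a conditional append per set bit; B first takes one popcount of the masked low bits (the output depends only on that count, not on bit positions) and then emits the whole tail in a single join over the counted range.
import Mathlib
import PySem

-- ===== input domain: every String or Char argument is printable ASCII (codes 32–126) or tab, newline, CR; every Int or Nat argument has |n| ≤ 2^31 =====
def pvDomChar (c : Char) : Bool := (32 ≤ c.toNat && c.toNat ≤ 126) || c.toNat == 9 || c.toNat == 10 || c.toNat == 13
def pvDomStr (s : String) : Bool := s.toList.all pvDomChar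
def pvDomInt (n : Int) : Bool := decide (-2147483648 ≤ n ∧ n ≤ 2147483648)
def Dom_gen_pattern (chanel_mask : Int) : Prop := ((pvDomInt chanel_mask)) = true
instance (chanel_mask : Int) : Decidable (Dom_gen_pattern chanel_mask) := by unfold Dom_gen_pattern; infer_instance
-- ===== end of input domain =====

-- B replaces A's 32-step bit scan (string grown inside the scan) by a popcount of the low
-- 32 bits followed by one join over range(2, 2+popcount); same result, simpler decomposition.

-- ===== PORT A =====
def gen_pattern (chanel_mask : Int) : String :=
  -- res = '{0};{1};'; c = 2; for i in range(32): if chanel_mask & (1 << i): res += …; c += 1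
  let st := (PySem.List.pyRange 0 32 1).foldl
    (fun (p : String × Int) i =>
      if PySem.Int.band chanel_mask ((1:Int) <<< i.toNat) ≠ 0 then
        (p.1 ++ PySem.Str.replace "{fn[0]};{fn[1]};" "fn" (PySem.Int.toStr p.2), p.2 + 1)
      else p)
    ("{0};{1};", (2:Int))
  st.1

-- ===== PORT B =====
def gen_pattern_alt (chanel_mask : Int) : String :=
  -- n = (chanel_mask & 0xFFFFFFFF).bit_count()
  let n : Nat := PySem.Int.bitCount (PySem.Int.band chanel_mask 4294967295)
  -- '{0};{1};' + ''.join('{%d[0]};{%d[1]};' % (c, c) for c in range(2, 2 + n))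
  -- ('{%d[0]};{%d[1]};' % (c, c) is ported by hand as the concatenation around str(c); exact for ints)
  "{0};{1};" ++ PySem.Str.join ""
    ((PySem.List.pyRange 2 (2 + (n : Int)) 1).map
      (fun c => "{" ++ PySem.Int.toStr c ++ "[0]};{" ++ PySem.Int.toStr c ++ "[1]};"))

-- ===== PRECONDITION & SPEC =====
def Spec_gen_pattern (chanel_mask : Int) (out : String) : Prop := out = gen_pattern_alt chanel_mask
instance (chanel_mask : Int) (out : String) : Decidable (Spec_gen_pattern chanel_mask out) := by unfold Spec_gen_pattern; infer_instance

-- ===== CLAIM (what is proved, stated in full; the proofs are below) =====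
def Claim_equal_gen_pattern : Prop := ∀ (chanel_mask : Int), Dom_gen_pattern chanel_mask → Spec_gen_pattern chanel_mask (gen_pattern chanel_mask)

-- ===== LEMMAS AND PROOFS =====

def chunkA (c : Int) : String := PySem.Str.replace "{fn[0]};{fn[1]};" "fn" (PySem.Int.toStr c)
def chunkB (c : Int) : String := "{" ++ PySem.Int.toStr c ++ "[0]};{" ++ PySem.Int.toStr c ++ "[1]};"

theorem join_nil : PySem.Str.join "" ([] : List String) = "" := by decide

theorem join_cons (x : String) (l : List String) :
    PySem.Str.join "" (x :: l) = x ++ PySem.Str.join "" l := by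
  apply String.toList_inj.mp
  simp [PySem.Str.toList_join, PySem.Chars.join, List.intercalate]
  induction l with
  | nil => simp
  | cons y t ih => simp

theorem chunk_eq (c : Int) (h1 : 2 ≤ c) (h2 : c ≤ 34) : chunkA c = chunkB c := by
  unfold chunkA chunkB
  interval_cases c <;> decide

-- complement bits
theorem compl_testBit (k : Nat) : ∀ a : Nat, a < 2^k → ∀ i : Nat, i < k →
    (2^k - 1 - a).testBit i = ! a.testBit i := by
  induction k with
  | zero => intro a _ i hi; omega
  | succ k ih =>
    intro a ha i hi
    have hN : 0 < 2^k := Nat.two_pow_pos k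
    have hpow : 2^(k+1) = 2*2^k := by ring
    cases i with
    | zero =>
      simp only [Nat.testBit_zero]
      rcases Nat.mod_two_eq_zero_or_one a with h | h <;>
        simp [h] <;> omega
    | succ i =>
      rw [Nat.testBit_succ, Nat.testBit_succ]
      have hdiv : (2^(k+1) - 1 - a) / 2 = 2^k - 1 - a/2 := by omega
      rw [hdiv]
      exact ih (a/2) (by omega) i (by omega)

theorem count_testBit_eq_bitCount (k : Nat) : ∀ v : Nat, v < 2^k →
    (List.range k).countP (fun i => v.testBit i) = PySem.Int.bitCount (v : Int) := by
  induction k with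
  | zero =>
    intro v hv
    have : v = 0 := by simpa using hv
    subst this; simp [PySem.Int.bitCount_zero]
  | succ k ih =>
    intro v hv
    rw [List.range_succ_eq_map, List.countP_cons, List.countP_map]
    have hc : (List.range k).countP (fun i => v.testBit i.succ) = (List.range k).countP (fun i => (v/2).testBit i) := by
      apply List.countP_congr
      intro i _
      simp [Nat.testBit_succ]
    rcases Nat.eq_zero_or_pos v with h0 | hpos
    · subst h0; simp [PySem.Int.bitCount_zero]
    · have hv2 : v / 2 < 2 ^ k := by omega
      have := PySem.Int.bitCount_natCast hpos
      rw [this]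
      show (List.range k).countP (fun i => v.testBit (Nat.succ i)) + _ = _
      rw [hc, ih (v/2) hv2, Nat.testBit_zero]
      rcases Nat.mod_two_eq_zero_or_one v with h | h <;> simp [h] <;> omega

theorem band_two_pow_test (m : Int) (i : Nat) (hi : i < 32) :
    (PySem.Int.band m ((1:Int) <<< i) ≠ 0) ↔
      ((PySem.Int.band m 4294967295).toNat).testBit i = true := by
  have hshift : ((1:Int) <<< i) = ((2^i : Nat) : Int) := by simp [Int.shiftLeft_eq]
  have hmask : (4294967295 : Nat) = 2^32 - 1 := by norm_num
  by_cases h : 0 ≤ m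
  · have hb : (0:Int) ≤ ((2^i : Nat) : Int) := by positivity
    rw [hshift]
    simp only [PySem.Int.band, h, if_true, if_pos (by norm_num : (0:Int) ≤ 4294967295)]
    rw [Int.toNat_natCast]
    have h1 : m.toNat &&& 2^i = (m.toNat.testBit i).toNat * 2^i := Nat.and_two_pow _ _
    have h2 : (m.toNat &&& (4294967295:Int).toNat) = m.toNat % 2^32 := by
      show m.toNat &&& 4294967295 = _
      rw [hmask, Nat.and_two_pow_sub_one_eq_mod]
    rw [Int.toNat_natCast, h2, Nat.testBit_mod_two_pow]
    simp only [hi, decide_true, Bool.true_and]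
    constructor
    · intro hne
      rcases hb' : m.toNat.testBit i with _ | _
      · exfalso; apply hne; rw [h1, hb']; simp
      · rfl
    · intro ht
      rw [h1, ht]
      simp
  · rw [hshift]
    simp only [PySem.Int.band, h, if_false, if_pos (by positivity : (0:Int) ≤ ((2^i:Nat):Int)),
      if_pos (by norm_num : (0:Int) ≤ 4294967295)]
    set a := (-m - 1).toNat with ha
    rw [Int.toNat_natCast]
    have h0 : (4294967295:Int).toNat = (4294967295:Nat) := rfl
    rw [h0]
    have h1 : 2^i &&& a = 2^i * (a.testBit i).toNat := Nat.two_pow_and _ _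
    have h2 : ((4294967295:Nat) &&& a) = a % 2^32 := by
      rw [Nat.land_comm, hmask, Nat.and_two_pow_sub_one_eq_mod]
    rw [h2, hmask, Int.toNat_natCast]
    have h3 : (2^32 - 1 - a % 2^32).testBit i = ! (a % 2^32).testBit i :=
      compl_testBit 32 (a % 2^32) (Nat.mod_lt _ (by norm_num)) i hi
    rw [h3, Nat.testBit_mod_two_pow]
    simp only [hi, decide_true, Bool.true_and]
    rw [h1]
    have hp := Nat.two_pow_pos i
    rcases hb' : a.testBit i with _ | _ <;> simp

theorem fold_inv (P : Int → Prop) [DecidablePred P] (g : Int → String) (js : List Int) :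
    ∀ (res : String) (c : Int),
    js.foldl (fun (p : String × Int) i => if P i then (p.1 ++ g p.2, p.2 + 1) else p) (res, c)
    = (res ++ PySem.Str.join "" ((PySem.List.pyRange c (c + (js.countP (fun i => decide (P i)) : Nat)) 1).map g),
       c + (js.countP (fun i => decide (P i)) : Nat)) := by
  induction js with
  | nil =>
    intro res c
    simp [PySem.List.pyRange_one_eq_nil (le_refl c), join_nil]
  | cons j t ih =>
    intro res c
    rw [List.foldl_cons, List.countP_cons]
    by_cases hP : P j
    · rw [if_pos hP, ih]
      simp only [hP, decide_true, if_pos]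
      set k := t.countP (fun i => decide (P i)) with hk
      have hrange : PySem.List.pyRange c (c + ((k + 1 : Nat) : Int)) 1
          = c :: PySem.List.pyRange (c + 1) (c + ((k + 1 : Nat) : Int)) 1 :=
        PySem.List.pyRange_one_cons (by push_cast; omega)
      have harg : c + 1 + (k : Int) = c + ((k + 1 : Nat) : Int) := by push_cast; ring
      rw [harg] at *
      rw [hrange, List.map_cons, join_cons, ← String.append_assoc]
    · rw [if_neg hP, ih]
      simp [hP]

theorem n_lt_two_pow (m : Int) : (PySem.Int.band m 4294967295).toNat < 2^32 := by
  have hmask : (4294967295 : Nat) = 2^32 - 1 := by norm_num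
  by_cases h : 0 ≤ m
  · simp only [PySem.Int.band, h, if_true, if_pos (by norm_num : (0:Int) ≤ 4294967295)]
    rw [Int.toNat_natCast]
    have : m.toNat &&& (4294967295:Int).toNat = m.toNat % 2^32 := by
      show m.toNat &&& 4294967295 = _
      rw [hmask, Nat.and_two_pow_sub_one_eq_mod]
    rw [this]
    exact Nat.mod_lt _ (by norm_num)
  · simp only [PySem.Int.band, h, if_false, if_pos (by norm_num : (0:Int) ≤ 4294967295)]
    rw [Int.toNat_natCast]
    have h0 : (4294967295:Int).toNat = (4294967295:Nat) := rfl
    rw [h0]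
    omega

theorem count_eq_bitCount (m : Int) :
    ((PySem.List.pyRange 0 32 1).countP
        (fun i => decide (PySem.Int.band m ((1:Int) <<< i.toNat) ≠ 0)) : Nat)
      = PySem.Int.bitCount (PySem.Int.band m 4294967295) := by
  have hnn : 0 ≤ PySem.Int.band m 4294967295 := by
    rw [PySem.Int.band_comm]
    exact PySem.Int.band_nonneg_of_nonneg_left m (by norm_num)
  set n := (PySem.Int.band m 4294967295).toNat with hn
  have h1 := PySem.List.pyRange_one (0:Int) 32
  have h2 : ((32:Int) - 0).toNat = 32 := rfl
  rw [h1, h2]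
  simp only [List.countP_map]
  rw [List.countP_congr (q := fun k => n.testBit k) ?_]
  · rw [count_testBit_eq_bitCount 32 n (n_lt_two_pow m)]
    rw [hn, Int.toNat_of_nonneg hnn]
  · intro k hk
    have hk32 : k < 32 := List.mem_range.mp hk
    simp only [Function.comp]
    have ht : ((0:Int) + (k:Int)).toNat = k := by omega
    rw [ht, decide_eq_true_eq, Int.shiftLeft_natCast_right]
    have hb := band_two_pow_test m k hk32
    rw [← hn] at hb
    exact hb

theorem ab_eq (m : Int) : gen_pattern m = gen_pattern_alt m := by
  have hA0 : gen_pattern m = ((PySem.List.pyRange 0 32 1).foldl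
      (fun (p : String × Int) i =>
        if PySem.Int.band m ((1:Int) <<< i.toNat) ≠ 0 then (p.1 ++ chunkA p.2, p.2 + 1) else p)
      ("{0};{1};", (2:Int))).1 := rfl
  have hf := fold_inv (fun i => PySem.Int.band m ((1:Int) <<< ((i.toNat : Nat) : Int)) ≠ 0) chunkA
    (PySem.List.pyRange 0 32 1) "{0};{1};" 2
  rw [hA0, hf]
  set K := (PySem.List.pyRange 0 32 1).countP
    (fun i => decide (PySem.Int.band m ((1:Int) <<< ((i.toNat : Nat) : Int)) ≠ 0)) with hK
  have hKle : K ≤ 32 := by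
    have h1 : K ≤ (PySem.List.pyRange 0 32 1).length := List.countP_le_length
    have h2 : (PySem.List.pyRange 0 32 1).length = 32 := by
      rw [PySem.List.length_pyRange_one]; rfl
    omega
  have hN : K = PySem.Int.bitCount (PySem.Int.band m 4294967295) := by
    rw [hK]; exact count_eq_bitCount m
  show _ = "{0};{1};" ++ PySem.Str.join ""
    ((PySem.List.pyRange 2 (2 + ((PySem.Int.bitCount (PySem.Int.band m 4294967295) : Nat) : Int)) 1).map
      (fun c => "{" ++ PySem.Int.toStr c ++ "[0]};{" ++ PySem.Int.toStr c ++ "[1]};"))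
  rw [← hN]
  exact congrArg (fun l => "{0};{1};" ++ PySem.Str.join "" l)
    (List.map_congr_left (fun c hc => by
      have hmem := (PySem.List.mem_pyRange_one).mp hc
      exact chunk_eq c (by omega) (by omega)))

-- ===== VERDICT (by name: the statement is the Claim_ definition above) =====
theorem gen_pattern_spec : Claim_equal_gen_pattern := by
  intro m _
  show gen_pattern m = gen_pattern_alt m
  exact ab_eq m
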